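-- pv_equiv track=rewrite | github.com/omarstfa/PyFTE | components/modules/faultTreeReconstruction.py | create_event_cut_set_dict
-- ===== SOURCE A (Python) =====
-- def create_event_cut_set_dict(basic_events, minimal_cut_sets):
--     """
--     Create a dictionary where the keys are index of basic events (index starts from 1) and the value is the
--     indices of the minimal cut sets (index starts from 0) which include that basic event.
--     :param basic_events: Set which includes the index of basic events (index starts from 1)
--     :param minimal_cut_sets: List of minimal cut sets (index starts from 0)
--     :return: Returns event dictionary
--     """
--     event_dictionary = {}
--
--     for basic_event in basic_events:
--         minimal_cut_set_ids = set()
--         for i in range(len(minimal_cut_sets)):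
--             if basic_event in minimal_cut_sets[i]:
--                 minimal_cut_set_ids.add(i)
--         event_dictionary[tuple([basic_event])] = minimal_cut_set_ids
--
--     return event_dictionary
-- ===== SOURCE B (Python) =====
-- def create_event_cut_set_dict(basic_events, minimal_cut_sets):
--     # Single inversion pass over the cut sets, then one lookup per basic event.
--     membership = {}
--     for i, cut_set in enumerate(minimal_cut_sets):
--         for event in cut_set:
--             membership.setdefault(event, set()).add(i)
--     return {(event,): membership.get(event, set()) for event in basic_events}
-- ===== Notes on version B (the rewrite author's own statement) =====
-- stated objective: faster
-- what changed: Instead of scanning every cut set once per basic event, B builds an inverted index event->cut-set-indices in a single pass over the cut sets and then answers each basic event by one dictionary lookup.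
import Mathlib
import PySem

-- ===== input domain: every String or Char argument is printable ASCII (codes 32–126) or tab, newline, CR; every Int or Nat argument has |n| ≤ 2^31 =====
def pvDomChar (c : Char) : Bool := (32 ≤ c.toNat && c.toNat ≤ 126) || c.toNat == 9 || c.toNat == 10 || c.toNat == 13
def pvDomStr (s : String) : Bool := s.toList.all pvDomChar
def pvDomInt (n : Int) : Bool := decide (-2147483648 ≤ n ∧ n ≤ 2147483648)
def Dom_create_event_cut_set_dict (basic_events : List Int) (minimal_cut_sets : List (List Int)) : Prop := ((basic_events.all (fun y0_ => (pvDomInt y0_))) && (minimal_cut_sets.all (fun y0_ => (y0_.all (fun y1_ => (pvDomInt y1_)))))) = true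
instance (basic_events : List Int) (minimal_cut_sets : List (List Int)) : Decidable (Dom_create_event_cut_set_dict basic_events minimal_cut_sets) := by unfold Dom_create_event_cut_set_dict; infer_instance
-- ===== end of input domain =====

-- B replaces A's per-event scan of all cut sets by one inverted-index pass over the cut sets (objective: faster, asymptotic).

-- ===== PORT A =====
-- for each basic_event: scan range(len(minimal_cut_sets)), collect the matching indices into a set, store under (basic_event,)
def create_event_cut_set_dict (basic_events : List Int) (minimal_cut_sets : List (List Int)) : List (List Int × List Int) :=
  (basic_events.foldl
    (fun d be =>
      d.insert [be]
        ((PySem.List.pyRange 0 (minimal_cut_sets.length : Int) 1).foldl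
          (fun ids i =>
            if be ∈ PySem.List.pyGetD minimal_cut_sets i [] then PySem.Set.add ids i else ids)
          PySem.Set.empty))
    PySem.Dict.empty).items

-- ===== PORT B =====
-- inverted index: one pass over enumerate(minimal_cut_sets), membership.setdefault(event, set()).add(i)
def pvMembership (minimal_cut_sets : List (List Int)) : PySem.Dict Int (List Int) :=
  (PySem.List.enumerate minimal_cut_sets 0).foldl
    (fun m p => p.2.foldl (fun m e => m.modify e [] (fun s => PySem.Set.add s p.1)) m)
    PySem.Dict.empty

def create_event_cut_set_dict_alt (basic_events : List Int) (minimal_cut_sets : List (List Int)) : List (List Int × List Int) :=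
  let m := pvMembership minimal_cut_sets
  (basic_events.foldl (fun d be => d.insert [be] (m.getD be [])) PySem.Dict.empty).items

-- ===== PRECONDITION & SPEC =====
def Spec_create_event_cut_set_dict (basic_events : List Int) (minimal_cut_sets : List (List Int)) (out : List (List Int × List Int)) : Prop := out = create_event_cut_set_dict_alt basic_events minimal_cut_sets
instance (basic_events : List Int) (minimal_cut_sets : List (List Int)) (out : List (List Int × List Int)) : Decidable (Spec_create_event_cut_set_dict basic_events minimal_cut_sets out) := by unfold Spec_create_event_cut_set_dict; infer_instance

-- ===== CLAIM (what is proved, stated in full; the proofs are below) =====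
def Claim_equal_create_event_cut_set_dict : Prop := ∀ (basic_events : List Int) (minimal_cut_sets : List (List Int)), Dom_create_event_cut_set_dict basic_events minimal_cut_sets → Spec_create_event_cut_set_dict basic_events minimal_cut_sets (create_event_cut_set_dict basic_events minimal_cut_sets)

-- ===== LEMMAS AND PROOFS =====

-- B's inner loop over one cut set, viewed through getD at one event
lemma pvInner (cs : List Int) (d : PySem.Dict Int (List Int)) (i be : Int) :
    (cs.foldl (fun m e => m.modify e [] (fun s => PySem.Set.add s i)) d).getD be []
      = if be ∈ cs then PySem.Set.add (d.getD be []) i else d.getD be [] := by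
  induction cs generalizing d with
  | nil => simp
  | cons e cs ih =>
    simp only [List.foldl_cons, ih, PySem.Dict.getD_modify, List.mem_cons]
    by_cases h : be = e
    · subst h
      simp
    · simp [h]

-- B's outer loop over the enumerated cut sets, viewed through getD at one event
lemma pvOuter (l : List (Int × List Int)) (d : PySem.Dict Int (List Int)) (be : Int) :
    (l.foldl (fun m p => p.2.foldl (fun m e => m.modify e [] (fun s => PySem.Set.add s p.1)) m) d).getD be []
      = l.foldl (fun s p => if be ∈ p.2 then PySem.Set.add s p.1 else s) (d.getD be []) := by
  induction l generalizing d with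
  | nil => rfl
  | cons p l ih =>
    simp only [List.foldl_cons, ih, pvInner]

-- the inverted index answers exactly A's per-event scan
lemma pvKey (minimal_cut_sets : List (List Int)) (be : Int) :
    (pvMembership minimal_cut_sets).getD be []
      = (PySem.List.pyRange 0 (minimal_cut_sets.length : Int) 1).foldl
          (fun ids i =>
            if be ∈ PySem.List.pyGetD minimal_cut_sets i [] then PySem.Set.add ids i else ids)
          PySem.Set.empty := by
  unfold pvMembership
  rw [pvOuter]
  rw [PySem.List.enumerate_eq_map_pyRange minimal_cut_sets ([] : List Int), List.foldl_map]
  rfl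

-- ===== VERDICT (by name: the statement is the Claim_ definition above) =====
theorem create_event_cut_set_dict_spec : Claim_equal_create_event_cut_set_dict := by
  intro basic_events minimal_cut_sets _
  unfold Spec_create_event_cut_set_dict create_event_cut_set_dict create_event_cut_set_dict_alt
  have h :
      (fun (d : PySem.Dict (List Int) (List Int)) be =>
          d.insert [be]
            ((PySem.List.pyRange 0 (minimal_cut_sets.length : Int) 1).foldl
              (fun ids i =>
                if be ∈ PySem.List.pyGetD minimal_cut_sets i [] then PySem.Set.add ids i else ids)
              PySem.Set.empty))
        = (fun (d : PySem.Dict (List Int) (List Int)) be =>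
            d.insert [be] ((pvMembership minimal_cut_sets).getD be [])) := by
    funext d be
    rw [pvKey]
  rw [h]
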